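-- pv_equiv track=rewrite | github.com/Puzhihui/DCL | gen_defect_imgs/merge_defect.py | expansion_imgs
-- ===== SOURCE A (Python) =====
-- def expansion_imgs(img_list, gen_num):
--     if len(img_list) >= gen_num or len(img_list) == 0:
--         return img_list
--     else:
--         need_num = gen_num - len(img_list)
--         need_img_list = []
--         while len(need_img_list) < need_num:
--             for img in img_list:
--                 need_img_list.append(img)
--                 if len(need_img_list) >= need_num:
--                     break
--         img_list.extend(need_img_list)
--         return img_list
-- ===== SOURCE B (Python) =====
-- def expansion_imgs(img_list, gen_num):
--     if len(img_list) >= gen_num or len(img_list) == 0: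
--         return img_list
--     else:
--         need_num = gen_num - len(img_list)
--         n = len(img_list)
--         padding = (img_list * (need_num // n + 1))[:need_num]
--         img_list.extend(padding)
--         return img_list
-- ===== Notes on version B (the rewrite author's own statement) =====
-- stated objective: idiomatic
-- what changed: Replaces the nested while/for append-with-break accumulation by a single repeat-and-truncate: padding = (img_list * (need//n + 1))[:need], then one extend.
import Mathlib
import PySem

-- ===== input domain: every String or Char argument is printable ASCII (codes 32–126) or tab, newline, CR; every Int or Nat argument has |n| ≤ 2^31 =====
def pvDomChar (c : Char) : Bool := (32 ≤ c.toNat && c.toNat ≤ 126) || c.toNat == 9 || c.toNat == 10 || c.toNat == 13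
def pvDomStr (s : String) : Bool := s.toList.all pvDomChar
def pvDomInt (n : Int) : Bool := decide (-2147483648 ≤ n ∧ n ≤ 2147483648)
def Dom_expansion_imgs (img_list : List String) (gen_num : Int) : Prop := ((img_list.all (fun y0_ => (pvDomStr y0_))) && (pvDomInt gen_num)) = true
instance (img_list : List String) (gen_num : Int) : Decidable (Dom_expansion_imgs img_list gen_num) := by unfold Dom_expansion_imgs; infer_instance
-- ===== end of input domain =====

-- B replaces A's nested while/for append-with-break loop by a single repeat-and-truncate
-- (idiomatic; same return value; both Pythons mutate img_list in place identically).

-- ===== PORT A =====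
-- inner `for img in img_list: append; if len >= need: break`
def pvInnerFor (imgs acc : List String) (need : Nat) : List String :=
  match imgs with
  | [] => acc
  | x :: xs =>
    let acc' := acc ++ [x]
    if need ≤ acc'.length then acc' else pvInnerFor xs acc' need

-- outer `while len(need_img_list) < need_num`; fuel = need_num suffices because each
-- iteration of the body appends at least one element (img_list is nonempty there).
def pvWhile (fuel : Nat) (imgs acc : List String) (need : Nat) : List String :=
  match fuel with
  | 0 => acc
  | fuel + 1 => if acc.length < need then pvWhile fuel imgs (pvInnerFor imgs acc need) need else acc

def expansion_imgs (img_list : List String) (gen_num : Int) : List String :=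
  if gen_num ≤ (img_list.length : Int) ∨ img_list.length = 0 then img_list
  else
    let need : Nat := (gen_num - img_list.length).toNat
    img_list ++ pvWhile need img_list [] need

-- ===== PORT B =====
-- `img_list * k` is (List.replicate k img_list).flatten; `[:need]` with need ≥ 0 is List.take;
-- `need // n` with need, n > 0 is Nat division (exact here).
def expansion_imgs_alt (img_list : List String) (gen_num : Int) : List String :=
  if gen_num ≤ (img_list.length : Int) ∨ img_list.length = 0 then img_list
  else
    let need : Nat := (gen_num - img_list.length).toNat
    let n : Nat := img_list.length
    let padding := ((List.replicate (need / n + 1) img_list).flatten).take need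
    img_list ++ padding

-- ===== PRECONDITION & SPEC =====
def Spec_expansion_imgs (img_list : List String) (gen_num : Int) (out : List String) : Prop := out = expansion_imgs_alt img_list gen_num
instance (img_list : List String) (gen_num : Int) (out : List String) : Decidable (Spec_expansion_imgs img_list gen_num out) := by unfold Spec_expansion_imgs; infer_instance

-- ===== CLAIM (what is proved, stated in full; the proofs are below) =====
def Claim_equal_expansion_imgs : Prop := ∀ (img_list : List String) (gen_num : Int), Dom_expansion_imgs img_list gen_num → Spec_expansion_imgs img_list gen_num (expansion_imgs img_list gen_num)

-- ===== LEMMAS AND PROOFS =====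

lemma pvInnerFor_eq (imgs : List String) : ∀ (acc : List String) (need : Nat),
    acc.length < need → pvInnerFor imgs acc need = acc ++ imgs.take (need - acc.length) := by
  induction imgs with
  | nil => intro acc need _; simp [pvInnerFor]
  | cons x xs ih =>
    intro acc need h
    simp only [pvInnerFor]
    by_cases hc : need ≤ (acc ++ [x]).length
    · rw [if_pos hc]
      have hc' : need ≤ acc.length + 1 := by simpa using hc
      have h1 : need - acc.length = 1 := by omega
      rw [h1]
      simp
    · have hlt : (acc ++ [x]).length < need := by omega
      rw [if_neg hc, ih _ _ hlt]
      have hl : (acc ++ [x]).length = acc.length + 1 := by simp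
      rw [hl]
      have h1 : need - acc.length = (need - (acc.length + 1)) + 1 := by omega
      rw [h1, List.take_succ_cons, List.append_assoc, List.singleton_append]

lemma pvWhile_done (fuel : Nat) (imgs acc : List String) (need : Nat)
    (h : need ≤ acc.length) : pvWhile fuel imgs acc need = acc := by
  cases fuel with
  | zero => rfl
  | succ f =>
    simp [pvWhile]
    omega

lemma flatten_replicate_length (a : Nat) (l : List String) :
    ((List.replicate a l).flatten).length = a * l.length := by
  induction a with
  | zero => simp
  | succ a ih =>
    simp [List.replicate_succ, ih]
    ring

lemma pvWhile_eq (imgs : List String) (hne : imgs ≠ []) (need : Nat) :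
    ∀ (fuel : Nat) (acc : List String), need - acc.length ≤ fuel →
    pvWhile fuel imgs acc need = acc ++ ((List.replicate fuel imgs).flatten).take (need - acc.length) := by
  have hn : 1 ≤ imgs.length := by
    cases imgs with
    | nil => exact absurd rfl hne
    | cons _ _ => simp
  intro fuel
  induction fuel with
  | zero =>
    intro acc h
    have h0 : need - acc.length = 0 := by omega
    simp [pvWhile, h0]
  | succ f ih =>
    intro acc h
    simp only [pvWhile]
    by_cases hlt : acc.length < need
    · rw [if_pos hlt, pvInnerFor_eq imgs acc need hlt]
      set k := need - acc.length with hk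
      by_cases hkn : k ≤ imgs.length
      · have hlen : (acc ++ imgs.take k).length = need := by
          simp [List.length_take]
          omega
        rw [pvWhile_done f imgs _ need (by omega)]
        rw [List.replicate_succ, List.flatten_cons,
            List.take_append_of_le_length (by simpa using hkn)]
      · have htk : imgs.take k = imgs := List.take_of_length_le (by omega)
        have hlen2 : need - (acc ++ imgs).length = k - imgs.length := by
          simp
          omega
        rw [htk, ih (acc ++ imgs) (by simp; omega), hlen2,
            List.replicate_succ, List.flatten_cons, List.append_assoc]
        congr 1
        rw [List.take_append, htk]
    · rw [if_neg hlt]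
      have h0 : need - acc.length = 0 := by omega
      simp [h0]

lemma cycle_take_succ (m a : Nat) (l : List String) (h : m ≤ a * l.length) :
    ((List.replicate a l).flatten).take m = ((List.replicate (a + 1) l).flatten).take m := by
  rw [List.replicate_succ', List.flatten_append]
  rw [List.take_append_of_le_length (by rw [flatten_replicate_length]; exact h)]

lemma cycle_take_le (m : Nat) (l : List String) :
    ∀ (b a : Nat), a ≤ b → m ≤ a * l.length →
    ((List.replicate a l).flatten).take m = ((List.replicate b l).flatten).take m := by
  intro b
  induction b with
  | zero =>
    intro a hab _
    obtain rfl : a = 0 := by omega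
    rfl
  | succ b ih =>
    intro a hab hm
    by_cases hEq : a = b + 1
    · subst hEq; rfl
    · have hab' : a ≤ b := by omega
      rw [ih a hab' hm, cycle_take_succ m b l (le_trans hm (Nat.mul_le_mul_right _ hab'))]

lemma cycle_take_eq (m : Nat) (l : List String) (a b : Nat)
    (ha : m ≤ a * l.length) (hb : m ≤ b * l.length) :
    ((List.replicate a l).flatten).take m = ((List.replicate b l).flatten).take m := by
  rcases le_total a b with h | h
  · exact cycle_take_le m l b a h ha
  · exact (cycle_take_le m l a b h hb).symm

-- ===== VERDICT (by name: the statement is the Claim_ definition above) =====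
theorem expansion_imgs_spec : Claim_equal_expansion_imgs := by
  intro img_list gen_num _
  unfold Spec_expansion_imgs expansion_imgs expansion_imgs_alt
  by_cases hg : gen_num ≤ (img_list.length : Int) ∨ img_list.length = 0
  · rw [if_pos hg, if_pos hg]
  · rw [if_neg hg, if_neg hg]
    have hg2 : img_list.length ≠ 0 := fun h => hg (Or.inr h)
    have hn : 1 ≤ img_list.length := Nat.one_le_iff_ne_zero.mpr hg2
    have hne : img_list ≠ [] := by
      intro h
      rw [h] at hn
      simp at hn
    show img_list ++ pvWhile ((gen_num - img_list.length).toNat) img_list [] ((gen_num - img_list.length).toNat)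
       = img_list ++ ((List.replicate ((gen_num - img_list.length).toNat / img_list.length + 1) img_list).flatten).take ((gen_num - img_list.length).toNat)
    rw [pvWhile_eq img_list hne ((gen_num - img_list.length).toNat) ((gen_num - img_list.length).toNat) [] (by simp)]
    simp only [List.length_nil, Nat.sub_zero, List.nil_append]
    refine congrArg _ (cycle_take_eq _ _ _ _ ?_ ?_)
    · exact Nat.le_mul_of_pos_right _ hn
    · set need := (gen_num - img_list.length).toNat
      set n := img_list.length
      have hdm := Nat.div_add_mod need n
      have hmod : need % n < n := Nat.mod_lt _ hn
      calc need ≤ n * (need / n) + n := by omega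
        _ = (need / n + 1) * n := by ring
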